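-- pv_equiv track=rewrite | github.com/miliar/Code_Jam_Webscraper | solutions_python/solutions_year15_round0_nr2/762.py | get_min_minutes
-- ===== SOURCE A (Python) =====
-- def get_min_minutes(p, memo):
--     p = sorted(p)
--     if tuple(p) in memo:
--         return memo[tuple(p)]
--
--     mi = p[-1]
--     if p[-1] > 3:
--         for take in range(2, (p[-1]//2)+1):
--             v = get_min_minutes(p[:-1] + [take, p[-1] - take], memo) + 1
--             mi = min(v, mi)
--
--     memo[tuple(p)] = mi
--     return mi
-- ===== SOURCE B (Python) =====
-- def get_min_minutes(p, memo):
--     # Try every target maximum pile size d; reaching it costs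
--     # d minutes of eating plus ceil(c/d)-1 splits for every pile c > d.
--     # (Return-value equivalence only: A fills `memo` in place, B leaves it alone.)
--     m = max(p)
--     if m <= 3:
--         return m
--     best = m
--     for d in range(2, m):
--         best = min(best, d + sum(-(-c // d) - 1 for c in p if c > d))
--     return best
-- ===== Notes on version B (the rewrite author's own statement) =====
-- stated objective: alternative
-- what changed: Replaces the memoized recursion over all ways of repeatedly splitting the largest pile with a direct scan over candidate final maximum sizes d, scoring each as d + sum(ceil(c/d)-1) over piles larger than d and taking the minimum.
-- outside the precondition, e.g. on get_min_minutes([5], {(5,): 0}): A returns 0, B returns 4; on get_min_minutes([], {(): 7}): A returns 7, B raises ValueError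
import Mathlib
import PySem

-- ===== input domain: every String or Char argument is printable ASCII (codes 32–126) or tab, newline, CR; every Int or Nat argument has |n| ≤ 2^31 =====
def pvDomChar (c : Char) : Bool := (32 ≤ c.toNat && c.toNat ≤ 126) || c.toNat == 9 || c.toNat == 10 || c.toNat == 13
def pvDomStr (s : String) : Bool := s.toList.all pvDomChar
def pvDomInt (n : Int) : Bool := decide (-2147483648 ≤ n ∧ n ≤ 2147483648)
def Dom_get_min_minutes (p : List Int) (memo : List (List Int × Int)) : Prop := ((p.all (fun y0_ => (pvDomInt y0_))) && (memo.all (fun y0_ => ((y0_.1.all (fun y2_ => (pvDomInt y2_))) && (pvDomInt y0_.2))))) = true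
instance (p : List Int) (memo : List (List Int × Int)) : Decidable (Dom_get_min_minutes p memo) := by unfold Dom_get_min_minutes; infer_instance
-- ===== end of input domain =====

-- B replaces A's memoized split recursion by a scan over candidate final maximum sizes
-- (objective: alternative); return-value equivalence only — A fills `memo` in place, B leaves it alone.

-- ===== PORT A =====
-- `tuple(p) in memo` + `memo[tuple(p)]` : first-match lookup in the association list
def pvLookupA (memo : List (List Int × Int)) (q : List Int) : Option Int :=
  (memo.find? (fun kv => kv.1 == q)).map (·.2)

-- fuel: strictly more than Σ max(c-1,0); every recursive call of A decreases that sum by 1,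
-- so the fuel is never exhausted (a totality guard only, proved sufficient below)
def pvFuelA (p : List Int) : Nat := (p.map (fun c => (c - 1).toNat)).sum + 1

def pvARec : Nat → List Int → List (List Int × Int) → Int × List (List Int × Int)
  | 0, _, memo => (0, memo)   -- unreachable with pvFuelA fuel (pvARec_fuel_mono / main lemma)
  | fuel + 1, p, memo =>
    let q := PySem.List.sorted p (fun x => x) false        -- p = sorted(p)
    match pvLookupA memo q with
    | some v => (v, memo)                                  -- if tuple(p) in memo: return memo[tuple(p)]
    | none =>
      let m := (PySem.List.pyGet? q (-1)).getD 0           -- p[-1] (q ≠ [] on every admitted input)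
      let st :=
        if 3 < m then                                      -- if p[-1] > 3:
          (PySem.List.pyRange 2 (PySem.Int.floordiv m 2 + 1) 1).foldl
            (fun (st : Int × List (List Int × Int)) take =>
              -- v = get_min_minutes(p[:-1] + [take, p[-1]-take], memo) + 1; mi = min(v, mi)
              let r := pvARec fuel (q.dropLast ++ [take, m - take]) st.2
              (min (r.1 + 1) st.1, r.2))
            (m, memo)                                      -- mi = p[-1]
        else (m, memo)
      -- memo[tuple(p)] = mi : the key is absent here (the lookup above missed), so the
      -- dict assignment appends a fresh entry
      (st.1, st.2 ++ [(q, st.1)])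

def get_min_minutes (p : List Int) (memo : List (List Int × Int)) : Int :=
  (pvARec (pvFuelA p) p memo).1

-- ===== PORT B =====
-- d + sum(-(-c // d) - 1 for c in p if c > d)
def pvCostB (p : List Int) (d : Int) : Int :=
  d + ((p.filter (fun c => d < c)).map (fun c => -(PySem.Int.floordiv (-c) d) - 1)).sum

def get_min_minutes_alt (p : List Int) (memo : List (List Int × Int)) : Int :=
  let m := (PySem.List.max? p (fun x => x)).getD 0         -- max(p) (p ≠ [] on every admitted input)
  if m ≤ 3 then m
  else (PySem.List.pyRange 2 m 1).foldl (fun best d => min best (pvCostB p d)) m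

-- ===== PRECONDITION & SPEC =====
-- Pre_ excludes empty p (A raises IndexError, B ValueError, unless memo caches the empty tuple)
-- and memos caching any key with the same element sum and at-least the length of p: exactly those
-- keys can be states of A's recursion, and A then returns the arbitrary cached value instead of
-- computing anything.
def Pre_get_min_minutes (p : List Int) (memo : List (List Int × Int)) : Prop :=
  p ≠ [] ∧ ∀ kv ∈ memo, kv.1.sum ≠ p.sum ∨ kv.1.length < p.length
instance (p : List Int) (memo : List (List Int × Int)) : Decidable (Pre_get_min_minutes p memo) := by
  unfold Pre_get_min_minutes; infer_instance

def pvWitness_get_min_minutes : List Int × (List (List Int × Int)) := ([5, 2], [([7], 3)])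

def Spec_get_min_minutes (p : List Int) (memo : List (List Int × Int)) (out : Int) : Prop := out = get_min_minutes_alt p memo
instance (p : List Int) (memo : List (List Int × Int)) (out : Int) : Decidable (Spec_get_min_minutes p memo out) := by unfold Spec_get_min_minutes; infer_instance

-- ===== CLAIM (what is proved, stated in full; the proofs are below) =====
def Claim_equal_get_min_minutes : Prop := ∀ (p : List Int) (memo : List (List Int × Int)), Dom_get_min_minutes p memo → Pre_get_min_minutes p memo → Spec_get_min_minutes p memo (get_min_minutes p memo)

-- ===== LEMMAS AND PROOFS =====

def pvMaxE (x : List Int) : Int := (PySem.List.max? x (fun y => y)).getD 0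
def pvCeil (c d : Int) : Int := -(PySem.Int.floordiv (-c) d)
def pvs (c d : Int) : Int := if d < c then pvCeil c d - 1 else 0
def pvS (x : List Int) (d : Int) : Int :=
  ((x.filter (fun c => d < c)).map (fun c => -(PySem.Int.floordiv (-c) d) - 1)).sum

theorem pvFoldMin_comm (f : Int → Int) (l : List Int) (a : Int) :
    l.foldl (fun mi t => min (f t) mi) a = l.foldl (fun b t => min b (f t)) a := by
  induction l generalizing a with
  | nil => rfl
  | cons h t ih => rw [List.foldl_cons, List.foldl_cons, min_comm]; exact ih _

theorem pvFoldMin_le_init (f : Int → Int) (l : List Int) (a : Int) :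
    l.foldl (fun b t => min b (f t)) a ≤ a := by
  induction l generalizing a with
  | nil => simp
  | cons h t ih => exact le_trans (ih _) (min_le_left _ _)

theorem pvFoldMin_le_mem (f : Int → Int) {l : List Int} {t : Int} (ht : t ∈ l) (a : Int) :
    l.foldl (fun b u => min b (f u)) a ≤ f t := by
  induction l generalizing a with
  | nil => simp at ht
  | cons h tl ih =>
    rcases List.mem_cons.mp ht with rfl | ht'
    · exact le_trans (pvFoldMin_le_init f tl _) (min_le_right _ _)
    · exact ih ht' _
theorem pvFoldMin_cases (f : Int → Int) (l : List Int) (a : Int) :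
    l.foldl (fun b u => min b (f u)) a = a ∨ ∃ t ∈ l, l.foldl (fun b u => min b (f u)) a = f t := by
  induction l generalizing a with
  | nil => simp
  | cons h tl ih =>
    simp only [List.foldl_cons]
    rcases ih (min a (f h)) with heq | ⟨t, ht, heq⟩
    · rcases min_cases a (f h) with ⟨hm, _⟩ | ⟨hm, _⟩
      · left; rw [heq, hm]
      · right; exact ⟨h, List.mem_cons_self .., by rw [heq, hm]⟩
    · right; exact ⟨t, List.mem_cons_of_mem _ ht, heq⟩
theorem pvLe_foldMin (f : Int → Int) (l : List Int) (a c : Int) (h1 : c ≤ a)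
    (h2 : ∀ t ∈ l, c ≤ f t) : c ≤ l.foldl (fun b u => min b (f u)) a := by
  rcases pvFoldMin_cases f l a with heq | ⟨t, ht, heq⟩
  · rw [heq]; exact h1
  · rw [heq]; exact h2 t ht
theorem pvFoldMin_congr {f g : Int → Int} (l : List Int) (a : Int)
    (h : ∀ t ∈ l, f t = g t) :
    l.foldl (fun b u => min b (f u)) a = l.foldl (fun b u => min b (g u)) a := by
  induction l generalizing a with
  | nil => rfl
  | cons hd tl ih =>
    simp only [List.foldl_cons, h hd (List.mem_cons_self ..)]
    exact ih _ (fun t ht => h t (List.mem_cons_of_mem _ ht))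

theorem pvMaxE_mem {x : List Int} (h : x ≠ []) : pvMaxE x ∈ x := by
  unfold pvMaxE
  cases hm : PySem.List.max? x (fun y => y) with
  | none => exact absurd ((PySem.List.max?_eq_none_iff _ _).mp hm) h
  | some m => simpa using PySem.List.max?_mem hm

theorem pvMaxE_ge {x : List Int} (h : x ≠ []) : ∀ c ∈ x, c ≤ pvMaxE x := by
  unfold pvMaxE
  cases hm : PySem.List.max? x (fun y => y) with
  | none => exact absurd ((PySem.List.max?_eq_none_iff _ _).mp hm) h
  | some m => simpa using fun c hc => PySem.List.max?_isMax hm c hc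

theorem pvMaxE_perm {x y : List Int} (h : x.Perm y) : pvMaxE x = pvMaxE y := by
  rcases eq_or_ne x [] with rfl | hx
  · simp [List.Perm.nil_eq h |>.symm]
  · have hy : y ≠ [] := fun hy => hx (List.Perm.eq_nil (hy ▸ h))
    exact le_antisymm (pvMaxE_ge hy _ (h.mem_iff.mp (pvMaxE_mem hx)))
      (pvMaxE_ge hx _ (h.mem_iff.mpr (pvMaxE_mem hy)))

theorem pvS_perm {x y : List Int} (d : Int) (h : x.Perm y) : pvS x d = pvS y d :=
  List.Perm.sum_eq (List.Perm.map _ (List.Perm.filter _ h))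

theorem pvS_append (x y : List Int) (d : Int) : pvS (x ++ y) d = pvS x d + pvS y d := by
  simp [pvS]

theorem pvS_singleton (c d : Int) : pvS [c] d = pvs c d := by
  by_cases h : d < c <;> simp [pvS, pvs, pvCeil, h]

theorem pvCeil_brackets {c d : Int} (hd : 0 < d) :
    (pvCeil c d - 1) * d < c ∧ c ≤ pvCeil c d * d :=
  (PySem.Int.neg_floordiv_neg_eq_iff_of_pos hd).mp rfl

theorem pvCeil_eq {c d q : Int} (hd : 0 < d) (h1 : (q - 1) * d < c) (h2 : c ≤ q * d) :
    pvCeil c d = q :=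
  (PySem.Int.neg_floordiv_neg_eq_iff_of_pos hd).mpr ⟨h1, h2⟩

-- pvs is ≥ 1 on piles strictly above d
theorem pvs_pos {c d : Int} (hd : 0 < d) (hc : d < c) : 1 ≤ pvs c d := by
  have hb := (pvCeil_brackets (c := c) (d := d) hd)
  simp only [pvs, if_pos hc]
  nlinarith [hb.1, hb.2]

-- F1: subadditivity of split cost
theorem pvs_subadd {a b d : Int} (hd : 2 ≤ d) (ha : 2 ≤ a) (hb : 2 ≤ b) :
    pvs (a + b) d ≤ pvs a d + pvs b d + 1 := by
  have hd0 : (0:Int) < d := by omega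
  have hba := pvCeil_brackets (c := a) (d := d) hd0
  have hbb := pvCeil_brackets (c := b) (d := d) hd0
  have hbm := pvCeil_brackets (c := a + b) (d := d) hd0
  unfold pvs
  split_ifs with h1 h2 h3 h2 h3 <;> nlinarith [hba.1, hba.2, hbb.1, hbb.2, hbm.1, hbm.2]

-- F2: an exact split of the maximal pile for target d
theorem pvs_split {d m : Int} (hd : 2 ≤ d) (hdm : d < m) (hm : 4 ≤ m) :
    ∃ t, 2 ≤ t ∧ t ≤ PySem.Int.floordiv m 2 ∧ pvs t d + pvs (m - t) d + 1 = pvs m d := by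
  have hd0 : (0:Int) < d := by omega
  have h2 : (0:Int) < 2 := by omega
  have hbm := pvCeil_brackets (c := m) (d := d) hd0
  by_cases hsmall : m - d ≤ 1
  · -- m = d + 1: split off a 2
    refine ⟨2, le_refl _, ?_, ?_⟩
    · rw [PySem.Int.le_floordiv_iff_mul_le h2]; omega
    · have hm2 : m - 2 ≤ d := by omega
      have hceil : pvCeil m d = 2 := pvCeil_eq hd0 (by omega) (by nlinarith)
      simp only [pvs, if_neg (by omega : ¬ d < 2), if_neg (by omega : ¬ d < m - 2),
        if_pos hdm, hceil]
      omega
  · -- m - d ≥ 2: split off a piece of size d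
    refine ⟨min d (m - d), by omega, ?_, ?_⟩
    · rw [PySem.Int.le_floordiv_iff_mul_le h2]; omega
    · by_cases hc : m - d ≤ d
      · -- both pieces ≤ d, ceil m d = 2
        have hceil : pvCeil m d = 2 := pvCeil_eq hd0 (by omega) (by nlinarith)
        have e1 : pvs (min d (m - d)) d = 0 := by
          simp only [pvs, if_neg (by omega : ¬ d < min d (m - d))]
        have e2 : pvs (m - min d (m - d)) d = 0 := by
          simp only [pvs, if_neg (by omega : ¬ d < m - min d (m - d))]
        rw [e1, e2]
        simp only [pvs, if_pos hdm, hceil]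
        omega
      · -- larger piece m - d > d: ceil (m-d) d = ceil m d - 1
        have hc' : d < m - d := by omega
        have hmin : min d (m - d) = d := by omega
        have hceil : pvCeil (m - d) d = pvCeil m d - 1 :=
          pvCeil_eq hd0 (by nlinarith [hbm.1]) (by nlinarith [hbm.2])
        rw [hmin]
        simp only [pvs, if_neg (by omega : ¬ d < d), if_pos hc', if_pos hdm, hceil]
        ring

def pvGU (x : List Int) : Int :=
  (PySem.List.pyRange 2 (pvMaxE x) 1).foldl (fun b d => min b (pvCostB x d)) (pvMaxE x)

theorem pvCostB_eq (p : List Int) (d : Int) : pvCostB p d = d + pvS p d := rfl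

theorem pvS_nonneg {x : List Int} {d : Int} (hd : 0 < d) : 0 ≤ pvS x d := by
  apply List.sum_nonneg
  intro v hv
  rcases List.mem_map.mp hv with ⟨c, hc, rfl⟩
  have hdc : d < c := by simpa using (List.mem_filter.mp hc).2
  have := pvs_pos hd hdc
  simp only [pvs, if_pos hdc, pvCeil] at this ⊢
  omega

theorem pvS_ge_one {x : List Int} {d c : Int} (hd : 0 < d) (hc : c ∈ x) (hdc : d < c) :
    1 ≤ pvS x d := by
  have hmem : c ∈ x.filter (fun c => d < c) := List.mem_filter.mpr ⟨hc, by simpa using hdc⟩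
  have hel : (pvCeil c d - 1) ∈ (x.filter (fun c => d < c)).map (fun c => -(PySem.Int.floordiv (-c) d) - 1) := by
    exact List.mem_map.mpr ⟨c, hmem, rfl⟩
  have h1 : 1 ≤ pvCeil c d - 1 := by have := pvs_pos hd hdc; simpa [pvs, if_pos hdc] using this
  refine le_trans h1 (List.single_le_sum ?_ _ hel)
  intro v hv
  rcases List.mem_map.mp hv with ⟨e, he, rfl⟩
  have hde : d < e := by simpa using (List.mem_filter.mp he).2
  have := pvs_pos hd hde
  simp only [pvs, if_pos hde, pvCeil] at this ⊢
  omega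

theorem pvCostB_perm {x y : List Int} (d : Int) (h : x.Perm y) : pvCostB x d = pvCostB y d := by
  rw [pvCostB_eq, pvCostB_eq, pvS_perm d h]

theorem pvGU_perm {x y : List Int} (h : x.Perm y) : pvGU x = pvGU y := by
  unfold pvGU
  rw [pvMaxE_perm h]
  exact pvFoldMin_congr _ _ (fun t _ => pvCostB_perm t h)

theorem pvGU_le_init (x : List Int) : pvGU x ≤ pvMaxE x := pvFoldMin_le_init _ _ _

theorem pvGU_le_cost {x : List Int} {d : Int} (hx : x ≠ []) (hd : 2 ≤ d)
    (hdm : d ≤ pvMaxE x) : pvGU x ≤ pvCostB x d := by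
  rcases lt_or_eq_of_le hdm with hlt | heq
  · exact pvFoldMin_le_mem _ ((PySem.List.mem_pyRange_one).mpr ⟨hd, hlt⟩) _
  · subst heq
    have hfil : x.filter (fun c => pvMaxE x < c) = [] := by
      apply List.filter_eq_nil_iff.mpr
      intro c hc
      simpa using not_lt.mpr (pvMaxE_ge hx c hc)
    calc pvGU x ≤ pvMaxE x := pvGU_le_init x
      _ = pvCostB x (pvMaxE x) := by simp [pvCostB, hfil]

theorem pvGU_le_max {x : List Int} {d : Int} (hx : x ≠ []) (hd : 2 ≤ d) :
    pvGU x ≤ max d (pvCostB x d) := by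
  rcases le_or_gt (pvMaxE x) d with h | h
  · exact le_max_of_le_left (le_trans (pvGU_le_init x) h)
  · exact le_max_of_le_right (pvGU_le_cost hx hd (le_of_lt h))

theorem pvGU_cases (x : List Int) :
    pvGU x = pvMaxE x ∨ ∃ d, 2 ≤ d ∧ d < pvMaxE x ∧ pvGU x = pvCostB x d := by
  rcases pvFoldMin_cases (pvCostB x) (PySem.List.pyRange 2 (pvMaxE x) 1) (pvMaxE x) with h | ⟨d, hd, h⟩
  · exact Or.inl h
  · rcases (PySem.List.mem_pyRange_one).mp hd with ⟨h1, h2⟩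
    exact Or.inr ⟨d, h1, h2, h⟩

theorem pvMaxE_eq {x : List Int} {m : Int} (hmem : m ∈ x) (hub : ∀ c ∈ x, c ≤ m) :
    pvMaxE x = m := by
  have hx : x ≠ [] := List.ne_nil_of_mem hmem
  exact le_antisymm (hub _ (pvMaxE_mem hx)) (pvMaxE_ge hx m hmem)

theorem pvS_pair (rest : List Int) (a b d : Int) :
    pvS (rest ++ [a, b]) d = pvS rest d + pvs a d + pvs b d := by
  have : rest ++ [a, b] = (rest ++ [a]) ++ [b] := by simp
  rw [this, pvS_append, pvS_append, pvS_singleton, pvS_singleton]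

theorem pvS_snoc (rest : List Int) (a d : Int) :
    pvS (rest ++ [a]) d = pvS rest d + pvs a d := by
  rw [pvS_append, pvS_singleton]

theorem pvS_eq_zero {x : List Int} {d : Int} (h : ∀ c ∈ x, c ≤ d) : pvS x d = 0 := by
  have hfil : x.filter (fun c => d < c) = [] :=
    List.filter_eq_nil_iff.mpr (fun c hc => by simpa using not_lt.mpr (h c hc))
  simp [pvS, hfil]

theorem pvGU_small {x : List Int} (hx : x ≠ []) (h2 : 2 ≤ pvMaxE x) (h3 : pvMaxE x ≤ 3) :
    pvGU x = pvMaxE x := by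
  refine le_antisymm (pvGU_le_init x) ?_
  refine pvLe_foldMin _ _ _ _ (le_refl _) ?_
  intro d hd
  rcases (PySem.List.mem_pyRange_one).mp hd with ⟨hd2, hdm⟩
  have hd23 : d = 2 ∧ pvMaxE x = 3 := by omega
  rcases hd23 with ⟨rfl, hm3⟩
  have hS : 1 ≤ pvS x 2 := pvS_ge_one (by omega) (pvMaxE_mem hx) (by omega)
  rw [pvCostB_eq]
  omega

theorem pvCore {rest : List Int} {m : Int} (hm : 3 < m) (hrest : ∀ c ∈ rest, c ≤ m) :
    (PySem.List.pyRange 2 (PySem.Int.floordiv m 2 + 1) 1).foldl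
      (fun mi take => min (pvGU (rest ++ [take, m - take]) + 1) mi) m = pvGU (rest ++ [m]) := by
  have h20 : (0:Int) < 2 := by omega
  have hfd2 : PySem.Int.floordiv m 2 * 2 ≤ m := by
    exact (PySem.Int.le_floordiv_iff_mul_le h20).mp (le_refl _)
  have hfdm : PySem.Int.floordiv m 2 < m := by
    rw [PySem.Int.floordiv_lt_iff_lt_mul h20]; omega
  have hxmem : m ∈ rest ++ [m] := by simp
  have hxub : ∀ c ∈ rest ++ [m], c ≤ m := by
    intro c hc; rcases List.mem_append.mp hc with h | h
    · exact hrest c h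
    · simp at h; omega
  have hmax : pvMaxE (rest ++ [m]) = m := pvMaxE_eq hxmem hxub
  have hxne : rest ++ [m] ≠ [] := by simp
  -- facts about a single split
  have hsplit : ∀ t, 2 ≤ t → t ≤ PySem.Int.floordiv m 2 →
      2 ≤ pvMaxE (rest ++ [t, m - t]) ∧ pvMaxE (rest ++ [t, m - t]) ≤ m ∧
      m ≤ 2 * pvMaxE (rest ++ [t, m - t]) ∧
      (∀ c ∈ rest ++ [t, m - t], c ≤ pvMaxE (rest ++ [t, m - t])) := by
    intro t ht1 ht2
    have hne : rest ++ [t, m - t] ≠ [] := by simp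
    have htm : 2 ≤ m - t := by omega
    have h1 : 2 ≤ pvMaxE (rest ++ [t, m - t]) :=
      le_trans ht1 (pvMaxE_ge hne t (by simp))
    have hmt : m - t ≤ pvMaxE (rest ++ [t, m - t]) := pvMaxE_ge hne _ (by simp)
    have h2' : pvMaxE (rest ++ [t, m - t]) ≤ m := by
      refine (pvMaxE_ge hne) |> fun _ => ?_
      have := pvMaxE_mem hne
      rcases List.mem_append.mp this with h | h
      · exact hrest _ h
      · simp at h; omega
    exact ⟨h1, h2', by omega, pvMaxE_ge hne⟩
  rw [pvFoldMin_comm]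
  refine le_antisymm ?_ ?_
  · -- fold ≤ pvGU (rest ++ [m])
    rcases pvGU_cases (rest ++ [m]) with hc | ⟨d, hd2, hdm, hc⟩
    · rw [hc, hmax]; exact pvFoldMin_le_init _ _ _
    · rw [hmax] at hdm
      rcases pvs_split hd2 hdm (by omega) with ⟨t, ht1, ht2, hts⟩
      have htmem : t ∈ PySem.List.pyRange 2 (PySem.Int.floordiv m 2 + 1) 1 :=
        (PySem.List.mem_pyRange_one).mpr ⟨ht1, by omega⟩
      have hle := pvFoldMin_le_mem (fun take => pvGU (rest ++ [take, m - take]) + 1) htmem m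
      rcases hsplit t ht1 ht2 with ⟨hs1, hs2, hs3, hs4⟩
      have hgu := pvGU_le_max (x := rest ++ [t, m - t]) (d := d) (by simp) hd2
      have hcx : pvCostB (rest ++ [m]) d = d + pvS rest d + pvs m d := by
        rw [pvCostB_eq, pvS_snoc]; ring
      have hcs : pvCostB (rest ++ [t, m - t]) d = d + pvS rest d + pvs t d + pvs (m - t) d := by
        rw [pvCostB_eq, pvS_pair]; ring
      have hpos : 1 ≤ pvs m d := pvs_pos (by omega) hdm
      have hSnn : 0 ≤ pvS rest d := pvS_nonneg (by omega)
      rw [hc, hcx]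
      rcases max_cases d (pvCostB (rest ++ [t, m - t]) d) with ⟨hmx, _⟩ | ⟨hmx, _⟩ <;>
        rw [hmx] at hgu
      · omega
      · rw [hcs] at hgu; omega
  · -- pvGU (rest ++ [m]) ≤ fold
    have hgi : pvGU (rest ++ [m]) ≤ m := by
      have := pvGU_le_init (rest ++ [m]); omega
    refine pvLe_foldMin _ _ _ _ hgi ?_
    intro t ht
    rcases (PySem.List.mem_pyRange_one).mp ht with ⟨ht1, ht2'⟩
    have ht2 : t ≤ PySem.Int.floordiv m 2 := by omega
    rcases hsplit t ht1 ht2 with ⟨hs1, hs2, hs3, hs4⟩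
    rcases pvGU_cases (rest ++ [t, m - t]) with hc | ⟨d, hd2, hdm, hc⟩
    · -- pvGU split = m'
      rw [hc]
      rcases eq_or_lt_of_le hs2 with heq | hlt
      · have hgi := pvGU_le_init (rest ++ [m])
        rw [hmax] at hgi
        omega
      · set m' := pvMaxE (rest ++ [t, m - t]) with hm'
        have hle : pvGU (rest ++ [m]) ≤ pvCostB (rest ++ [m]) m' :=
          pvGU_le_cost hxne hs1 (by rw [hmax]; omega)
        have hrest' : pvS rest m' = 0 := by
          apply pvS_eq_zero
          intro c hcr
          exact hs4 c (by simp [hcr])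
        have hceil : pvCeil m m' = 2 := pvCeil_eq (by omega) (by nlinarith) (by nlinarith)
        have hpv : pvs m m' = 1 := by simp only [pvs, if_pos hlt, hceil]; omega
        rw [pvCostB_eq, pvS_snoc, hrest', hpv] at hle
        omega
    · -- pvGU split = cost d
      rw [hc]
      have hle : pvGU (rest ++ [m]) ≤ pvCostB (rest ++ [m]) d :=
        pvGU_le_cost hxne hd2 (by rw [hmax]; omega)
      have hsub : pvs (t + (m - t)) d ≤ pvs t d + pvs (m - t) d + 1 :=
        pvs_subadd hd2 ht1 (by omega)
      have hmm : t + (m - t) = m := by ring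
      rw [hmm] at hsub
      rw [pvCostB_eq, pvS_snoc] at hle
      rw [pvCostB_eq, pvS_pair]
      omega

def pvMz (x : List Int) : Nat := (x.map (fun c => (c - 1).toNat)).sum

def pvInvA (memo : List (List Int × Int)) (s : Int) (n : Nat) : Prop :=
  ∀ kv ∈ memo, kv.1.sum = s → n ≤ kv.1.length → kv.2 = pvGU kv.1

theorem pvMz_perm {x y : List Int} (h : x.Perm y) : pvMz x = pvMz y :=
  List.Perm.sum_eq (List.Perm.map _ h)

theorem pvMz_append (x y : List Int) : pvMz (x ++ y) = pvMz x + pvMz y := by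
  simp [pvMz]

-- q[-1] of the sorted list is the maximum
theorem pvSortedLast_eq_max {x : List Int} (hx : x ≠ []) :
    (PySem.List.pyGet? (PySem.List.sorted x (fun y => y) false) (-1)).getD 0 = pvMaxE x := by
  have hperm : (PySem.List.sorted x (fun y => y) false).Perm x := PySem.List.sorted_perm x _ _
  have hq : PySem.List.sorted x (fun y => y) false ≠ [] := by
    intro h
    rw [h] at hperm
    exact hx hperm.symm.eq_nil
  rw [PySem.List.pyGet?_neg_one, List.getLast?_eq_some_getLast hq, Option.getD_some]
  have hlmem : (PySem.List.sorted x (fun y => y) false).getLast hq ∈ x :=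
    hperm.mem_iff.mp (List.getLast_mem hq)
  refine le_antisymm (pvMaxE_ge hx _ hlmem) ?_
  have hpw : (PySem.List.sorted x (fun y => y) false).Pairwise (fun a b => a ≤ b) := by
    simpa using PySem.List.sorted_pairwise x (fun y => y)
  have hsplit := List.dropLast_append_getLast hq
  have hmem : pvMaxE x ∈ PySem.List.sorted x (fun y => y) false :=
    hperm.mem_iff.mpr (pvMaxE_mem hx)
  rw [← hsplit] at hpw hmem
  rcases List.mem_append.mp hmem with h | h
  · exact (List.pairwise_append.mp hpw).2.2 _ h _ (by simp)
  · simp at h; omega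

theorem pvInvA_append {memo : List (List Int × Int)} {s : Int} {n : Nat} {q : List Int} {v : Int}
    (h : pvInvA memo s n) (hv : q.sum = s → n ≤ q.length → v = pvGU q) :
    pvInvA (memo ++ [(q, v)]) s n := by
  intro kv hkv hsum hlen
  rcases List.mem_append.mp hkv with h' | h'
  · exact h kv h' hsum hlen
  · simp at h'
    subst h'
    exact hv hsum hlen

theorem pvLookupA_none {memo : List (List Int × Int)} {s : Int} {n : Nat} {q : List Int}
    (h : ∀ kv ∈ memo, kv.1.sum ≠ s ∨ kv.1.length < n) (hsum : q.sum = s) (hlen : n ≤ q.length) :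
    pvLookupA memo q = none := by
  unfold pvLookupA
  rw [List.find?_eq_none.mpr]
  · rfl
  · intro kv hkv
    simp only [beq_iff_eq]
    intro heq
    rcases h kv hkv with h' | h' <;> rw [heq] at h' <;> omega


-- the inner `for take in range(...)` loop: threads memo, computes the pure fold of B-values
theorem pvLoop (f : Nat) (rest : List Int) (m s : Int) (n : Nat)
    (ihf : ∀ (x : List Int) (memo : List (List Int × Int)),
      pvMz x < f → x ≠ [] → 2 ≤ pvMaxE x → x.sum = s → n ≤ x.length → pvInvA memo s n →
      (pvARec f x memo).1 = pvGU x ∧ pvInvA (pvARec f x memo).2 s n)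
    (hMz : ∀ t, 2 ≤ t → 2 ≤ m - t → pvMz (rest ++ [t, m - t]) < f)
    (hsum : ∀ t, (rest ++ [t, m - t]).sum = s)
    (hlen : ∀ t, n ≤ (rest ++ [t, m - t]).length) :
    ∀ (l : List Int) (a : Int) (memo : List (List Int × Int)),
    (∀ t ∈ l, 2 ≤ t ∧ 2 ≤ m - t) → pvInvA memo s n →
    (l.foldl (fun (st : Int × List (List Int × Int)) take =>
        (min ((pvARec f (rest ++ [take, m - take]) st.2).1 + 1) st.1,
         (pvARec f (rest ++ [take, m - take]) st.2).2)) (a, memo)).1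
      = l.foldl (fun mi take => min (pvGU (rest ++ [take, m - take]) + 1) mi) a
    ∧ pvInvA (l.foldl (fun (st : Int × List (List Int × Int)) take =>
        (min ((pvARec f (rest ++ [take, m - take]) st.2).1 + 1) st.1,
         (pvARec f (rest ++ [take, m - take]) st.2).2)) (a, memo)).2 s n := by
  intro l
  induction l with
  | nil => intro a memo _ hinv; exact ⟨rfl, hinv⟩
  | cons t tl ih =>
    intro a memo hbnd hinv
    have ht := hbnd t (List.mem_cons_self ..)
    have hne : rest ++ [t, m - t] ≠ [] := by simp
    have hmx : 2 ≤ pvMaxE (rest ++ [t, m - t]) :=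
      le_trans ht.1 (pvMaxE_ge hne t (by simp))
    have hr := ihf (rest ++ [t, m - t]) memo (hMz t ht.1 ht.2) hne hmx (hsum t) (hlen t) hinv
    simp only [List.foldl_cons]
    rw [hr.1]
    exact ih (min (pvGU (rest ++ [t, m - t]) + 1) a) _
      (fun u hu => hbnd u (List.mem_cons_of_mem _ hu)) hr.2

-- main induction
theorem pvMain (s : Int) (n : Nat) : ∀ (fuel : Nat) (x : List Int) (memo : List (List Int × Int)),
    pvMz x < fuel → x ≠ [] → 2 ≤ pvMaxE x → x.sum = s → n ≤ x.length → pvInvA memo s n →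
    (pvARec fuel x memo).1 = pvGU x ∧ pvInvA (pvARec fuel x memo).2 s n := by
  intro fuel
  induction fuel with
  | zero => intro x memo h; omega
  | succ f ihf =>
    intro x memo hfuel hx hmax hsum hlen hinv
    set q := PySem.List.sorted x (fun y => y) false with hqdef
    have hperm : q.Perm x := PySem.List.sorted_perm x _ _
    have hqne : q ≠ [] := by
      intro h
      rw [h] at hperm
      exact hx hperm.symm.eq_nil
    have hqsum : q.sum = s := by rw [List.Perm.sum_eq hperm]; exact hsum
    have hqlen : n ≤ q.length := by rw [hperm.length_eq]; exact hlen
    have hguq : pvGU q = pvGU x := pvGU_perm hperm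
    cases hlook : pvLookupA memo q with
    | some v =>
      have hres : pvARec (f + 1) x memo = (v, memo) := by
        simp only [pvARec, ← hqdef, hlook]
      rw [hres]
      refine ⟨?_, hinv⟩
      -- the cached value is correct by the invariant
      unfold pvLookupA at hlook
      cases hfind : memo.find? (fun kv => kv.1 == q) with
      | none => rw [hfind] at hlook; simp at hlook
      | some kv =>
        rw [hfind] at hlook
        simp only [Option.map_some, Option.some.injEq] at hlook
        have hkvmem : kv ∈ memo := List.mem_of_find?_eq_some hfind
        have hkvq : kv.1 = q := by
          have := List.find?_some hfind
          simpa using this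
        have := hinv kv hkvmem (by rw [hkvq]; exact hqsum) (by rw [hkvq]; exact hqlen)
        simp [← hlook, this, hkvq, hguq]
    | none =>
      have hm : (PySem.List.pyGet? q (-1)).getD 0 = pvMaxE x := pvSortedLast_eq_max hx
      have hsplitq : q.dropLast ++ [q.getLast hqne] = q := List.dropLast_append_getLast hqne
      have hlast : q.getLast hqne = pvMaxE x := by
        rw [PySem.List.pyGet?_neg_one, List.getLast?_eq_some_getLast hqne, Option.getD_some] at hm
        exact hm
      by_cases h3 : 3 < pvMaxE x
      · -- big pile: the split loop runs
        have h20 : (0:Int) < 2 := by omega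
        have hfd2 : PySem.Int.floordiv (pvMaxE x) 2 * 2 ≤ pvMaxE x :=
          (PySem.Int.le_floordiv_iff_mul_le h20).mp (le_refl _)
        have hrest_ub : ∀ c ∈ q.dropLast, c ≤ pvMaxE x := by
          intro c hc
          exact pvMaxE_ge hx c (hperm.mem_iff.mp (by rw [← hsplitq]; exact List.mem_append_left _ hc))
        have hMzq : pvMz q = pvMz q.dropLast + (pvMaxE x - 1).toNat := by
          conv_lhs => rw [← hsplitq]
          rw [pvMz_append, hlast]
          simp [pvMz]
        have hMz : ∀ t, 2 ≤ t → 2 ≤ pvMaxE x - t → pvMz (q.dropLast ++ [t, pvMaxE x - t]) < f := by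
          intro t ht1 ht2
          have h1 : pvMz (q.dropLast ++ [t, pvMaxE x - t])
              = pvMz q.dropLast + (t - 1).toNat + (pvMaxE x - t - 1).toNat := by
            rw [pvMz_append]; simp [pvMz]; omega
          have hqx : pvMz q = pvMz x := pvMz_perm hperm
          omega
        have hsum' : ∀ t, (q.dropLast ++ [t, pvMaxE x - t]).sum = s := by
          intro t
          have : q.sum = q.dropLast.sum + pvMaxE x := by
            conv_lhs => rw [← hsplitq]
            rw [List.sum_append, hlast]; simp
          simp only [List.sum_append, List.sum_cons, List.sum_nil]
          omega
        have hlen' : ∀ t, n ≤ (q.dropLast ++ [t, pvMaxE x - t]).length := by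
          intro t
          have h1 : q.dropLast.length = q.length - 1 := List.length_dropLast
          have h2 : 1 ≤ q.length := List.length_pos_of_ne_nil hqne
          simp only [List.length_append, List.length_cons, List.length_nil]
          omega
        have hbnd : ∀ t ∈ PySem.List.pyRange 2 (PySem.Int.floordiv (pvMaxE x) 2 + 1) 1,
            2 ≤ t ∧ 2 ≤ pvMaxE x - t := by
          intro t ht
          rcases (PySem.List.mem_pyRange_one).mp ht with ⟨h1, h2⟩
          omega
        have hloop := pvLoop f q.dropLast (pvMaxE x) s n ihf hMz hsum' hlen'
          (PySem.List.pyRange 2 (PySem.Int.floordiv (pvMaxE x) 2 + 1) 1) (pvMaxE x) memo hbnd hinv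
        have hcore := pvCore (rest := q.dropLast) (m := pvMaxE x) h3 hrest_ub
        have hq2 : q.dropLast ++ [pvMaxE x] = q := by rw [← hlast]; exact hsplitq
        have hval : (PySem.List.pyRange 2 (PySem.Int.floordiv (pvMaxE x) 2 + 1) 1).foldl
            (fun mi take => min (pvGU (q.dropLast ++ [take, pvMaxE x - take]) + 1) mi) (pvMaxE x)
            = pvGU x := by
          rw [hcore, hq2, hguq]
        have hres : pvARec (f + 1) x memo
            = (((PySem.List.pyRange 2 (PySem.Int.floordiv (pvMaxE x) 2 + 1) 1).foldl
                (fun (st : Int × List (List Int × Int)) take =>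
                  (min ((pvARec f (q.dropLast ++ [take, pvMaxE x - take]) st.2).1 + 1) st.1,
                   (pvARec f (q.dropLast ++ [take, pvMaxE x - take]) st.2).2)) (pvMaxE x, memo)).1,
               ((PySem.List.pyRange 2 (PySem.Int.floordiv (pvMaxE x) 2 + 1) 1).foldl
                (fun (st : Int × List (List Int × Int)) take =>
                  (min ((pvARec f (q.dropLast ++ [take, pvMaxE x - take]) st.2).1 + 1) st.1,
                   (pvARec f (q.dropLast ++ [take, pvMaxE x - take]) st.2).2)) (pvMaxE x, memo)).2
               ++ [(q, ((PySem.List.pyRange 2 (PySem.Int.floordiv (pvMaxE x) 2 + 1) 1).foldl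
                (fun (st : Int × List (List Int × Int)) take =>
                  (min ((pvARec f (q.dropLast ++ [take, pvMaxE x - take]) st.2).1 + 1) st.1,
                   (pvARec f (q.dropLast ++ [take, pvMaxE x - take]) st.2).2)) (pvMaxE x, memo)).1)]) := by
          simp only [pvARec, ← hqdef, hlook, hm, if_pos h3]
        rw [hres]
        rw [hloop.1]
        refine ⟨hval, pvInvA_append hloop.2 ?_⟩
        intro hqs hql
        rw [hval, hguq]
      · -- small pile: no loop, value is the maximum itself
        have hres : pvARec (f + 1) x memo
            = (pvMaxE x, memo ++ [(q, pvMaxE x)]) := by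
          simp only [pvARec, ← hqdef, hlook, hm, if_neg h3]
        rw [hres]
        have hval : pvMaxE x = pvGU x := (pvGU_small hx hmax (by omega)).symm
        refine ⟨hval.symm ▸ rfl, pvInvA_append hinv ?_⟩
        intro hqs hql
        rw [hguq]
        omega


-- ===== VERDICT (by name: the statement is the Claim_ definition above) =====
theorem get_min_minutes_spec : Claim_equal_get_min_minutes := by
  unfold Claim_equal_get_min_minutes
  intro p memo _hdom hpre
  unfold Spec_get_min_minutes
  rcases hpre with ⟨hp, hmemo⟩
  have hinv : pvInvA memo p.sum p.length := by
    intro kv hkv hs hl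
    rcases hmemo kv hkv with h | h
    · exact absurd hs h
    · omega
  have hfuel : pvFuelA p = pvMz p + 1 := rfl
  have halt : get_min_minutes_alt p memo
      = if pvMaxE p ≤ 3 then pvMaxE p else pvGU p := rfl
  have hperm : (PySem.List.sorted p (fun y => y) false).Perm p := PySem.List.sorted_perm p _ _
  by_cases h3 : 3 < pvMaxE p
  · have hmain := pvMain p.sum p.length (pvFuelA p) p memo
      (by rw [hfuel]; exact Nat.lt_succ_self _) hp (by omega) rfl (le_refl _) hinv
    unfold get_min_minutes
    rw [hmain.1, halt, if_neg (by omega)]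
  · -- max(p) ≤ 3 : A returns p[-1] of the sorted list without looping
    have hlook : pvLookupA memo (PySem.List.sorted p (fun y => y) false) = none :=
      pvLookupA_none hmemo (List.Perm.sum_eq hperm) (le_of_eq hperm.length_eq.symm)
    have hm := pvSortedLast_eq_max hp
    unfold get_min_minutes
    rw [hfuel]
    have hres : pvARec (pvMz p + 1) p memo
        = (pvMaxE p, memo ++ [(PySem.List.sorted p (fun y => y) false, pvMaxE p)]) := by
      simp only [pvARec, hlook, hm, if_neg h3]
    rw [hres, halt, if_pos (by omega)]
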